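-- pv_equiv track=rewrite | github.com/iliaskaloup/LocVul | seq2seq_eval.py | create_sorted_lines_with_labels
-- ===== SOURCE A (Python) =====
-- def create_sorted_lines_with_labels(all_ranked_lines, all_flaw_lines, all_predicted_lines_number):
--
--     all_lines_with_labels = []
--     for func_idx, ranked_lines in enumerate(all_ranked_lines):
--         flaw_lines = all_flaw_lines[func_idx]
--
--         for line_idx, line_content in enumerate(ranked_lines):
--             if line_idx < all_predicted_lines_number[func_idx]:
--                 line_score = 1 # lines predicted as vulnerable
--             else:
--                 line_score = 0 # lines not predicted as vulnerable
--
--             if line_content in flaw_lines: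
--                 label = 1
--             else:
--                 label = 0
--
--             all_lines_with_labels.append((line_content, line_score, label))
--
--     sorted_lines_with_labels = sorted(all_lines_with_labels, key=lambda x: x[1], reverse=True)
--
--     return sorted_lines_with_labels
-- ===== SOURCE B (Python) =====
-- def create_sorted_lines_with_labels(all_ranked_lines, all_flaw_lines, all_predicted_lines_number):
--     predicted = []
--     not_predicted = []
--     for func_idx, ranked_lines in enumerate(all_ranked_lines):
--         flaw_lines = all_flaw_lines[func_idx]
--         k = all_predicted_lines_number[func_idx]
--         for line_idx, line_content in enumerate(ranked_lines):
--             label = 1 if line_content in flaw_lines else 0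
--             if line_idx < k:
--                 predicted.append((line_content, 1, label))
--             else:
--                 not_predicted.append((line_content, 0, label))
--     return predicted + not_predicted
-- ===== Notes on version B (the rewrite author's own statement) =====
-- stated objective: alternative
-- what changed: Replaces the collect-everything-then-stable-sort-by-binary-score pass with a single-pass two-bucket partition (predicted/not_predicted lists concatenated), removing the sort.
-- outside the precondition, e.g. on create_sorted_lines_with_labels([[]], [[]], []): A returns [], B raises IndexError
import Mathlib
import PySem

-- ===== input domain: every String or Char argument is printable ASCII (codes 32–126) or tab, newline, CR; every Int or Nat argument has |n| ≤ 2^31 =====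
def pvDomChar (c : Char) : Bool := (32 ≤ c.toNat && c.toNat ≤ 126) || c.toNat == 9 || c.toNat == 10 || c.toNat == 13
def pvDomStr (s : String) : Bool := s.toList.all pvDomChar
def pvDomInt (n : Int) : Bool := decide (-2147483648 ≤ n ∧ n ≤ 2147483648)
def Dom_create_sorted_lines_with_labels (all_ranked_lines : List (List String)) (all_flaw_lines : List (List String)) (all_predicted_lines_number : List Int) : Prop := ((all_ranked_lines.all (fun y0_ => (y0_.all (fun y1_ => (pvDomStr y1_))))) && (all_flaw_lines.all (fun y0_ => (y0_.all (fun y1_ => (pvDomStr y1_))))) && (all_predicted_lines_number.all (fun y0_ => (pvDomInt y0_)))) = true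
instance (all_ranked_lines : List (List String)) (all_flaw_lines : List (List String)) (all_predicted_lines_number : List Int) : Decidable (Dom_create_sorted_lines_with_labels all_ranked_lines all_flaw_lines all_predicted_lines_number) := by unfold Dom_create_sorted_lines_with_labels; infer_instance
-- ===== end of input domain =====

-- ===== PORT A =====
-- B changes: one-pass two-bucket partition instead of collect-then-stable-sort by the binary score.
-- Port of A: append every (line, score, label) tuple, then stable reverse-sort by the score.
def create_sorted_lines_with_labels (all_ranked_lines : List (List String)) (all_flaw_lines : List (List String)) (all_predicted_lines_number : List Int) : List (String × Int × Int) :=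
  let all_lines_with_labels :=
    (PySem.List.enumerate all_ranked_lines).foldl (fun acc p =>
      let flaw_lines := PySem.List.pyGetD all_flaw_lines p.1 []
      (PySem.List.enumerate p.2).foldl (fun acc2 q =>
        let line_score : Int := if q.1 < PySem.List.pyGetD all_predicted_lines_number p.1 0 then 1 else 0
        let label : Int := if flaw_lines.contains q.2 then 1 else 0
        acc2 ++ [(q.2, line_score, label)]) acc) []
  PySem.List.sorted all_lines_with_labels (fun x => x.2.1) true

-- ===== PORT B =====
-- Port of B: maintain the two buckets in one pass; return predicted ++ not_predicted.
def create_sorted_lines_with_labels_alt (all_ranked_lines : List (List String)) (all_flaw_lines : List (List String)) (all_predicted_lines_number : List Int) : List (String × Int × Int) :=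
  let pr :=
    (PySem.List.enumerate all_ranked_lines).foldl (fun pr p =>
      let flaw_lines := PySem.List.pyGetD all_flaw_lines p.1 []
      let k := PySem.List.pyGetD all_predicted_lines_number p.1 0
      (PySem.List.enumerate p.2).foldl (fun pr2 q =>
        let label : Int := if flaw_lines.contains q.2 then 1 else 0
        if q.1 < k then (pr2.1 ++ [(q.2, 1, label)], pr2.2)
        else (pr2.1, pr2.2 ++ [(q.2, 0, label)])) pr)
      (([], []) : List (String × Int × Int) × List (String × Int × Int))
  pr.1 ++ pr.2

-- ===== PRECONDITION & SPEC =====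
-- Pre_ excludes inputs where all_flaw_lines or all_predicted_lines_number is shorter than all_ranked_lines:
-- there A raises IndexError, except that an out-of-range entry of all_predicted_lines_number is only reached
-- inside a non-empty line list, so A accidentally returns when every over-the-end line list is empty; B's
-- natural per-function lookup raises IndexError on those inputs.
def Pre_create_sorted_lines_with_labels (all_ranked_lines : List (List String)) (all_flaw_lines : List (List String)) (all_predicted_lines_number : List Int) : Prop :=
  all_ranked_lines.length ≤ all_flaw_lines.length ∧ all_ranked_lines.length ≤ all_predicted_lines_number.length
instance (all_ranked_lines : List (List String)) (all_flaw_lines : List (List String)) (all_predicted_lines_number : List Int) : Decidable (Pre_create_sorted_lines_with_labels all_ranked_lines all_flaw_lines all_predicted_lines_number) := by unfold Pre_create_sorted_lines_with_labels; infer_instance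

def pvWitness_create_sorted_lines_with_labels : List (List String) × List (List String) × List Int :=
  ([["a", "b"]], [["b"]], [1])

def Spec_create_sorted_lines_with_labels (all_ranked_lines : List (List String)) (all_flaw_lines : List (List String)) (all_predicted_lines_number : List Int) (out : List (String × Int × Int)) : Prop := out = create_sorted_lines_with_labels_alt all_ranked_lines all_flaw_lines all_predicted_lines_number
instance (all_ranked_lines : List (List String)) (all_flaw_lines : List (List String)) (all_predicted_lines_number : List Int) (out : List (String × Int × Int)) : Decidable (Spec_create_sorted_lines_with_labels all_ranked_lines all_flaw_lines all_predicted_lines_number out) := by unfold Spec_create_sorted_lines_with_labels; infer_instance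

-- ===== CLAIM (what is proved, stated in full; the proofs are below) =====
def Claim_equal_create_sorted_lines_with_labels : Prop := ∀ (all_ranked_lines : List (List String)) (all_flaw_lines : List (List String)) (all_predicted_lines_number : List Int), Dom_create_sorted_lines_with_labels all_ranked_lines all_flaw_lines all_predicted_lines_number → Pre_create_sorted_lines_with_labels all_ranked_lines all_flaw_lines all_predicted_lines_number → Spec_create_sorted_lines_with_labels all_ranked_lines all_flaw_lines all_predicted_lines_number (create_sorted_lines_with_labels all_ranked_lines all_flaw_lines all_predicted_lines_number)

-- ===== LEMMAS AND PROOFS =====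

-- The tuple built for one enumerated line (used only by the proofs to name both ports' items).
def pvTuple (flaw : List String) (k : Int) (q : Int × String) : String × Int × Int :=
  (q.2, if q.1 < k then 1 else 0, if flaw.contains q.2 then 1 else 0)

-- A's inner loop appends the mapped tuples.
theorem a_inner (flaw : List String) (k : Int) (items : List (Int × String)) (acc : List (String × Int × Int)) :
    items.foldl (fun acc2 q =>
      let line_score : Int := if q.1 < k then 1 else 0
      let label : Int := if flaw.contains q.2 then 1 else 0
      acc2 ++ [(q.2, line_score, label)]) acc = acc ++ items.map (pvTuple flaw k) := by
  induction items generalizing acc with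
  | nil => simp
  | cons q t ih => rw [List.foldl_cons, ih]; simp [pvTuple]

-- B's inner loop extends the two buckets with the score-1 and score-0 tuples respectively.
theorem b_inner (flaw : List String) (k : Int) (items : List (Int × String)) (pr : List (String × Int × Int) × List (String × Int × Int)) :
    items.foldl (fun pr2 q =>
      let label : Int := if flaw.contains q.2 then 1 else 0
      if q.1 < k then (pr2.1 ++ [(q.2, 1, label)], pr2.2)
      else (pr2.1, pr2.2 ++ [(q.2, 0, label)])) pr
    = (pr.1 ++ (items.map (pvTuple flaw k)).filter (fun x => x.2.1 == 1),
       pr.2 ++ (items.map (pvTuple flaw k)).filter (fun x => x.2.1 == 0)) := by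
  induction items generalizing pr with
  | nil => simp
  | cons q t ih =>
    rw [List.foldl_cons, ih]
    by_cases h : q.1 < k <;> simp [pvTuple, h]

-- The flattened tuple stream of the whole input.
def pvStream (all_flaw_lines : List (List String)) (all_predicted_lines_number : List Int) (fs : List (Int × List String)) : List (String × Int × Int) :=
  fs.flatMap (fun p => (PySem.List.enumerate p.2).map (pvTuple (PySem.List.pyGetD all_flaw_lines p.1 []) (PySem.List.pyGetD all_predicted_lines_number p.1 0)))

theorem a_outer (fl : List (List String)) (pn : List Int) (fs : List (Int × List String)) (acc : List (String × Int × Int)) :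
    fs.foldl (fun acc p =>
      let flaw_lines := PySem.List.pyGetD fl p.1 []
      (PySem.List.enumerate p.2).foldl (fun acc2 q =>
        let line_score : Int := if q.1 < PySem.List.pyGetD pn p.1 0 then 1 else 0
        let label : Int := if flaw_lines.contains q.2 then 1 else 0
        acc2 ++ [(q.2, line_score, label)]) acc) acc = acc ++ pvStream fl pn fs := by
  induction fs generalizing acc with
  | nil => simp [pvStream]
  | cons p t ih =>
    rw [List.foldl_cons, ih]
    show (PySem.List.enumerate p.2).foldl _ acc ++ _ = _
    rw [a_inner]
    simp [pvStream]

theorem b_outer (fl : List (List String)) (pn : List Int) (fs : List (Int × List String)) (pr : List (String × Int × Int) × List (String × Int × Int)) :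
    fs.foldl (fun pr p =>
      let flaw_lines := PySem.List.pyGetD fl p.1 []
      let k := PySem.List.pyGetD pn p.1 0
      (PySem.List.enumerate p.2).foldl (fun pr2 q =>
        let label : Int := if flaw_lines.contains q.2 then 1 else 0
        if q.1 < k then (pr2.1 ++ [(q.2, 1, label)], pr2.2)
        else (pr2.1, pr2.2 ++ [(q.2, 0, label)])) pr) pr
    = (pr.1 ++ (pvStream fl pn fs).filter (fun x => x.2.1 == 1),
       pr.2 ++ (pvStream fl pn fs).filter (fun x => x.2.1 == 0)) := by
  induction fs generalizing pr with
  | nil => simp [pvStream]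
  | cons p t ih =>
    rw [List.foldl_cons, ih]
    simp only [b_inner]
    simp [pvStream, List.filter_append]

-- Every tuple in the stream has score 0 or 1.
theorem stream_binary (fl : List (List String)) (pn : List Int) (fs : List (Int × List String)) :
    ∀ x ∈ pvStream fl pn fs, x.2.1 = 0 ∨ x.2.1 = 1 := by
  intro x hx
  simp only [pvStream, List.mem_flatMap, List.mem_map] at hx
  obtain ⟨p, -, q, -, hx⟩ := hx
  subst hx
  by_cases h : q.1 < PySem.List.pyGetD pn p.1 0 <;> simp [pvTuple, h]

theorem insertBy_skip {α : Type} (before : α → α → Bool) (x : α) (P N : List α)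
    (h : ∀ y ∈ P, before x y = false) :
    PySem.List.insertBy before x (P ++ N) = P ++ PySem.List.insertBy before x N := by
  induction P with
  | nil => simp
  | cons y t ih =>
    have hy : before x y = false := h y (by simp)
    simp [PySem.List.insertBy, hy]
    exact ih (fun z hz => h z (by simp [hz]))

theorem insertBy_front {α : Type} (before : α → α → Bool) (x : α) (N : List α)
    (h : ∀ y ∈ N, before x y = true) :
    PySem.List.insertBy before x N = x :: N := by
  cases N with
  | nil => simp [PySem.List.insertBy]
  | cons y t => simp [PySem.List.insertBy, h y (by simp)]

-- Stable reverse insertion sort on a 0/1-keyed list is the two-bucket partition.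
theorem sorted_binary (L : List (String × Int × Int)) (hL : ∀ x ∈ L, x.2.1 = 0 ∨ x.2.1 = 1) :
    PySem.List.sorted L (fun x => x.2.1) true
    = L.filter (fun x => x.2.1 == 1) ++ L.filter (fun x => x.2.1 == 0) := by
  rw [PySem.List.sorted_rev_eq_foldl_insertBy]
  suffices h : ∀ (M : List (String × Int × Int)) (P N : List (String × Int × Int)),
      (∀ x ∈ M, x.2.1 = 0 ∨ x.2.1 = 1) → (∀ p ∈ P, p.2.1 = 1) → (∀ n ∈ N, n.2.1 = 0) →
      M.foldl (fun acc x => PySem.List.insertBy (fun a b => decide (b.2.1 < a.2.1)) x acc) (P ++ N)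
      = (P ++ M.filter (fun x => x.2.1 == 1)) ++ (N ++ M.filter (fun x => x.2.1 == 0)) by
    have := h L [] [] hL (by simp) (by simp)
    simpa using this
  intro M
  induction M with
  | nil => intro P N _ _ _; simp
  | cons x t ih =>
    intro P N hM hP hN
    rcases hM x (by simp) with h0 | h1
    · -- score 0: appended at the very end
      have hins : PySem.List.insertBy (fun a b => decide (b.2.1 < a.2.1)) x (P ++ N) = (P ++ N) ++ [x] := by
        apply PySem.List.insertBy_of_forall_not_before
        intro y hy
        rcases List.mem_append.mp hy with hy | hy
        · simp [hP y hy, h0]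
        · simp [hN y hy, h0]
      have := ih P (N ++ [x]) (fun z hz => hM z (by simp [hz])) hP
        (by intro n hn; rcases List.mem_append.mp hn with hn | hn
            · exact hN n hn
            · simp at hn; subst hn; exact h0)
      simp only [List.foldl_cons, hins, List.append_assoc] at this ⊢
      rw [this]
      simp [h0]
    · -- score 1: inserted right after P
      have hins : PySem.List.insertBy (fun a b => decide (b.2.1 < a.2.1)) x (P ++ N) = (P ++ [x]) ++ N := by
        rw [insertBy_skip _ _ _ _ (by intro y hy; simp [hP y hy, h1]),
            insertBy_front _ _ _ (by intro y hy; simp [hN y hy, h1])]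
        simp
      have := ih (P ++ [x]) N (fun z hz => hM z (by simp [hz]))
        (by intro p hp; rcases List.mem_append.mp hp with hp | hp
            · exact hP p hp
            · simp at hp; subst hp; exact h1) hN
      simp only [List.foldl_cons, hins] at this ⊢
      rw [this]
      simp [h1]

-- ===== VERDICT (by name: the statement is the Claim_ definition above) =====
theorem create_sorted_lines_with_labels_spec : Claim_equal_create_sorted_lines_with_labels := by
  intro rl fl pn _ _
  unfold Spec_create_sorted_lines_with_labels create_sorted_lines_with_labels create_sorted_lines_with_labels_alt
  rw [a_outer, b_outer]
  simp only [List.nil_append]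
  exact sorted_binary _ (stream_binary fl pn _)
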